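-- pv_equiv track=rewrite | github.com/trabajosproyecta/cubicator3000 | app/cubicator/optimizer.py | get_patterns
-- ===== SOURCE A (Python) =====
-- def get_patterns(cq, maxl):
--     patts = []
--     if not cq:
--         return patts
--     npatt = [0 for _ in cq]
--     corte, _ = cq[0]
--     while maxl >= 0:
--         returns = get_patterns(cq[1:], maxl)
--         for ret in returns:
--             patts.append(npatt[:1] + ret)
--         patts.append(list(npatt))
--         maxl -= corte
--         npatt[0] += 1
--     return patts
-- ===== SOURCE B (Python) =====
-- def get_patterns(cq, maxl):
--     # Top-down enumeration, memoized on (suffix index, remaining budget);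
--     # each level iterates the count directly over range(budget // cut + 1).
--     memo = {}
--
--     def go(i, budget):
--         if i == len(cq):
--             return []
--         if budget < 0:
--             return []
--         key = (i, budget)
--         if key in memo:
--             return memo[key]
--         cut = cq[i][0]
--         zeros = [0] * (len(cq) - i - 1)
--         out = []
--         for a in range(budget // cut + 1):
--             for ret in go(i + 1, budget - a * cut):
--                 out.append([a] + ret)
--             out.append([a] + zeros)
--         memo[key] = out
--         return out
--
--     return go(0, maxl)
-- ===== Notes on version B (the rewrite author's own statement) =====
-- stated objective: alternative
-- what changed: Replaces A's plain recursion (the tail patterns are re-enumerated from scratch for every count value at every level) by a top-down recursion memoized on (suffix index, remaining budget), iterating the count over range(budget//cut+1), so each distinct subproblem's pattern list is computed once and reused.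
import Mathlib
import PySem

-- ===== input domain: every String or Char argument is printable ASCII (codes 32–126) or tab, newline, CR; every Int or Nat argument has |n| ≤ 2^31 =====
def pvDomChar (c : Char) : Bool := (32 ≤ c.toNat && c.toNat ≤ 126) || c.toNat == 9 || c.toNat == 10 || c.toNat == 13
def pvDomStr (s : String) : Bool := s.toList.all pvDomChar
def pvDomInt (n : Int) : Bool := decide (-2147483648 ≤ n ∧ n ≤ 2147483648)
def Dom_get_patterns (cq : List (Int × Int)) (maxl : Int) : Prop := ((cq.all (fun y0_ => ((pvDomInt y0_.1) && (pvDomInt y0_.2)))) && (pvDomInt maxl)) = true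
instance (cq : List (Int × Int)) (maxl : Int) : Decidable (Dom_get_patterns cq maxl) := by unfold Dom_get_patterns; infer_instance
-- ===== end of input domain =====

-- B memoizes the recursion on (suffix index, remaining budget) and iterates the count over a
-- closed-form range, so each distinct (suffix index, budget) subproblem is computed once (objective: alternative).

-- ===== PORT A =====
-- A's while loop: each iteration recomputes the tail patterns for the current budget, appends
-- them prefixed with the current count, appends the count-followed-by-zeros pattern, then
-- decrements the budget by `corte` and increments the count.  The `0 < corte` conjunct in the
-- guard only totalizes the loop (Python diverges when it fails; excluded by Pre_).
def aloopA (zeros : List Int) (corte : Int) (f : Int → List (List Int)) (npatt0 m : Int) :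
    List (List Int) :=
  if _h : 0 ≤ m ∧ 0 < corte then
    ((f m).map (fun r => npatt0 :: r)) ++ [npatt0 :: zeros] ++
      aloopA zeros corte f (npatt0 + 1) (m - corte)
  else []
termination_by (m + 1).toNat
decreasing_by omega

def get_patterns : List (Int × Int) → Int → List (List Int)
  | [], _ => []
  | (corte, _) :: rest, maxl =>
      aloopA (rest.map (fun _ => (0 : Int))) corte (fun m => get_patterns rest m) 0 maxl

-- ===== PORT B =====
-- transliteration of Source B: `goB s i b memo` is Source B's `go(i, b)` where s = cq[i:], threading the
-- memo dict; `bloopB` is the `for a in range(...)` loop accumulating `out` and the memo.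
mutual
def goB : List (Int × Int) → Int → Int → PySem.Dict (Int × Int) (List (List Int)) →
    List (List Int) × PySem.Dict (Int × Int) (List (List Int))
  | [], _, _, memo => ([], memo)
  | (cut, _) :: rest, i, b, memo =>
    if b < 0 then ([], memo) else
    match memo.get? (i, b) with
    | some v => (v, memo)
    | none =>
      let zeros : List Int := rest.map (fun _ => (0 : Int))
      let res := bloopB rest i cut zeros b (List.range (PySem.Int.floordiv b cut + 1).toNat) [] memo
      (res.1, res.2.insert (i, b) res.1)
termination_by s _ _ _ => (s.length, 0)

def bloopB : List (Int × Int) → Int → Int → List Int → Int → List Nat → List (List Int) →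
    PySem.Dict (Int × Int) (List (List Int)) →
    List (List Int) × PySem.Dict (Int × Int) (List (List Int))
  | _, _, _, _, _, [], out, memo => (out, memo)
  | rest, i, cut, zeros, b, a :: as, out, memo =>
    let t := goB rest (i + 1) (b - (a : Int) * cut) memo
    bloopB rest i cut zeros b as
      (out ++ (t.1.map (fun r => (a : Int) :: r)) ++ [(a : Int) :: zeros]) t.2
termination_by rest _ _ _ _ as _ _ => (rest.length, as.length + 1)
end

def get_patterns_alt (cq : List (Int × Int)) (maxl : Int) : List (List Int) :=
  (goB cq 0 maxl PySem.Dict.empty).1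

-- ===== PRECONDITION & SPEC =====
-- Pre_ excludes exactly the inputs on which Python A diverges (infinite while loop): a
-- nonnegative budget together with some nonpositive cut value in cq.
def Pre_get_patterns (cq : List (Int × Int)) (maxl : Int) : Prop :=
  maxl < 0 ∨ ∀ p ∈ cq, 0 < p.1
instance (cq : List (Int × Int)) (maxl : Int) : Decidable (Pre_get_patterns cq maxl) := by
  unfold Pre_get_patterns; infer_instance
def pvWitness_get_patterns : (List (Int × Int)) × Int := ([(2, 0), (3, 1)], 6)

def Spec_get_patterns (cq : List (Int × Int)) (maxl : Int) (out : List (List Int)) : Prop := out = get_patterns_alt cq maxl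
instance (cq : List (Int × Int)) (maxl : Int) (out : List (List Int)) : Decidable (Spec_get_patterns cq maxl out) := by unfold Spec_get_patterns; infer_instance

-- ===== CLAIM (what is proved, stated in full; the proofs are below) =====
def Claim_equal_get_patterns : Prop := ∀ (cq : List (Int × Int)) (maxl : Int), Dom_get_patterns cq maxl → Pre_get_patterns cq maxl → Spec_get_patterns cq maxl (get_patterns cq maxl)

-- ===== LEMMAS AND PROOFS =====

-- the common pure backbone: what both programs compute, written as one flatMap per level
def gB : List (Int × Int) → Int → List (List Int)
  | [], _ => []
  | (cut, _) :: rest, b =>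
    if b < 0 then [] else
      (List.range (PySem.Int.floordiv b cut + 1).toNat).flatMap
        (fun (a : Nat) => ((gB rest (b - (a : Int) * cut)).map (fun r => (a : Int) :: r)) ++
          [(a : Int) :: rest.map (fun _ => (0 : Int))])

-- memo invariant: every stored value is the backbone value of the suffix its index denotes
def MemoInv (cq0 : List (Int × Int)) (memo : PySem.Dict (Int × Int) (List (List Int))) : Prop :=
  ∀ i b v, memo.get? (i, b) = some v → v = gB (cq0.drop i.toNat) b

theorem floordiv_small {m c : Int} (h0 : 0 ≤ m) (h1 : m < c) : PySem.Int.floordiv m c = 0 := by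
  rw [PySem.Int.floordiv_eq_ediv_of_pos (by omega)]
  exact Int.ediv_eq_zero_of_lt h0 h1

theorem floordiv_step {m c : Int} (hc : 0 < c) :
    PySem.Int.floordiv m c = PySem.Int.floordiv (m - c) c + 1 := by
  rw [PySem.Int.floordiv_eq_ediv_of_pos hc, PySem.Int.floordiv_eq_ediv_of_pos hc]
  have : m = (m - c) + 1 * c := by ring
  rw [this, Int.add_mul_ediv_right _ _ (by omega : c ≠ 0)]
  simp only [one_mul, add_sub_cancel_right]

-- A's loop equals the backbone's flatMap segment, shifted by the running count
theorem aloopA_eq (zeros : List Int) (c : Int) (f : Int → List (List Int)) (hc : 0 < c) :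
    ∀ m a, 0 ≤ m →
      aloopA zeros c f a m =
        (List.range (PySem.Int.floordiv m c + 1).toNat).flatMap
          (fun (j : Nat) => ((f (m - (j : Int) * c)).map (fun r => (a + (j : Int)) :: r)) ++
            [(a + (j : Int)) :: zeros]) := by
  suffices h : ∀ (k : Nat) (m a : Int), m.toNat ≤ k → 0 ≤ m →
      aloopA zeros c f a m =
        (List.range (PySem.Int.floordiv m c + 1).toNat).flatMap
          (fun (j : Nat) => ((f (m - (j : Int) * c)).map (fun r => (a + (j : Int)) :: r)) ++
            [(a + (j : Int)) :: zeros]) by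
    intro m a hm; exact h m.toNat m a le_rfl hm
  have base : ∀ (m a : Int), 0 ≤ m → m < c →
      aloopA zeros c f a m =
        (List.range (PySem.Int.floordiv m c + 1).toNat).flatMap
          (fun (j : Nat) => ((f (m - (j : Int) * c)).map (fun r => (a + (j : Int)) :: r)) ++
            [(a + (j : Int)) :: zeros]) := by
    intro m a hm hmc
    rw [aloopA, dif_pos ⟨hm, hc⟩, aloopA, dif_neg (by omega), floordiv_small hm hmc]
    simp
  intro k
  induction k with
  | zero =>
    intro m a hk hm
    exact base m a hm (by omega)
  | succ k ih =>
    intro m a hk hm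
    by_cases hmc : m < c
    · exact base m a hm hmc
    · have hmc' : 0 ≤ m - c := by omega
      have hq : 0 ≤ PySem.Int.floordiv (m - c) c := by
        rw [PySem.Int.floordiv_eq_ediv_of_pos hc]
        exact Int.ediv_nonneg hmc' (by omega)
      have hn : (PySem.Int.floordiv (m - c) c + 1 + 1).toNat
          = (PySem.Int.floordiv (m - c) c + 1).toNat + 1 := by omega
      conv_rhs => rw [floordiv_step hc, hn, List.range_succ_eq_map, List.flatMap_cons,
        List.flatMap_map]
      rw [aloopA, dif_pos ⟨hm, hc⟩, ih (m - c) (a + 1) (by omega) hmc']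
      simp only [Nat.cast_zero, zero_mul, sub_zero, add_zero]
      congr 1
      refine List.flatMap_congr (fun j _ => ?_)
      have h1 : ((a + 1) + (j : Int)) = a + ((j.succ : Nat) : Int) := by push_cast; ring
      have h2 : m - c - (j : Int) * c = m - ((j.succ : Nat) : Int) * c := by push_cast; ring
      rw [h1, h2]

theorem a_eq_gB : ∀ (cq : List (Int × Int)) (m : Int), Pre_get_patterns cq m →
    get_patterns cq m = gB cq m := by
  intro cq
  induction cq with
  | nil => intro m _; rfl
  | cons hd rest ih =>
    obtain ⟨c, d⟩ := hd
    intro m hpre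
    by_cases hm : m < 0
    · rw [get_patterns, aloopA, dif_neg (by omega), gB, if_pos hm]
    · have hpos : ∀ p ∈ (c, d) :: rest, 0 < p.1 := by
        rcases hpre with h | h
        · omega
        · exact h
      have hc : 0 < c := hpos (c, d) List.mem_cons_self
      rw [get_patterns, aloopA_eq _ _ _ hc m 0 (by omega), gB, if_neg hm]
      refine List.flatMap_congr (fun j _ => ?_)
      rw [ih (m - (j : Int) * c) (Or.inr (fun p hp => hpos p (List.mem_cons_of_mem _ hp)))]
      simp

theorem drop_toNat_succ (l : List (Int × Int)) (i : Int) (h : 0 ≤ i) :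
    l.drop (i + 1).toNat = (l.drop i.toNat).tail := by
  have : (i + 1).toNat = i.toNat + 1 := by omega
  rw [this, ← List.drop_drop, List.drop_one]

theorem goB_eq (cq0 : List (Int × Int)) :
    ∀ (s : List (Int × Int)) (i b : Int) memo, 0 ≤ i → s = cq0.drop i.toNat → MemoInv cq0 memo →
      (goB s i b memo).1 = gB s b ∧ MemoInv cq0 (goB s i b memo).2 := by
  intro s
  induction s with
  | nil =>
    intro i b memo _ _ hinv
    refine ⟨by simp [goB, gB], ?_⟩
    simpa [goB] using hinv
  | cons hd rest ih =>
    obtain ⟨c, d⟩ := hd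
    intro i b memo hi hs hinv
    have hrest : rest = cq0.drop (i + 1).toNat := by
      rw [drop_toNat_succ _ _ hi, ← hs]
      rfl
    have hbl : ∀ (as : List Nat) (out : List (List Int)) memo, MemoInv cq0 memo →
        (bloopB rest i c (rest.map (fun _ => (0 : Int))) b as out memo).1 =
          out ++ as.flatMap (fun (a : Nat) =>
            ((gB rest (b - (a : Int) * c)).map (fun r => (a : Int) :: r)) ++
              [(a : Int) :: rest.map (fun _ => (0 : Int))]) ∧
        MemoInv cq0 (bloopB rest i c (rest.map (fun _ => (0 : Int))) b as out memo).2 := by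
      intro as
      induction as with
      | nil =>
        intro out memo hinv
        refine ⟨by simp [bloopB], ?_⟩
        simpa [bloopB] using hinv
      | cons a as ihas =>
        intro out memo hinv
        have hgo := ih (i + 1) (b - (a : Int) * c) memo (by omega) hrest hinv
        rw [bloopB]
        obtain ⟨h1, h2⟩ := ihas
          (out ++ ((goB rest (i + 1) (b - (a : Int) * c) memo).1.map (fun r => (a : Int) :: r)) ++
            [(a : Int) :: rest.map (fun _ => (0 : Int))])
          (goB rest (i + 1) (b - (a : Int) * c) memo).2 hgo.2
        refine ⟨?_, h2⟩
        rw [h1, hgo.1, List.flatMap_cons]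
        simp [List.append_assoc]
    rw [goB]
    by_cases hb : b < 0
    · rw [if_pos hb]
      exact ⟨by rw [gB, if_pos hb], hinv⟩
    · rw [if_neg hb]
      cases hmem : memo.get? (i, b) with
      | some v =>
        refine ⟨?_, hinv⟩
        have := hinv i b v hmem
        rw [this, ← hs]
      | none =>
        obtain ⟨h1, h2⟩ := hbl (List.range (PySem.Int.floordiv b c + 1).toNat) [] memo hinv
        have hout : (bloopB rest i c (rest.map (fun _ => (0 : Int))) b
            (List.range (PySem.Int.floordiv b c + 1).toNat) [] memo).1 = gB ((c, d) :: rest) b := by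
          rw [h1, gB, if_neg hb]; rfl
        refine ⟨hout, ?_⟩
        intro i' b' v hv
        rw [PySem.Dict.get?_insert] at hv
        by_cases he : (i', b') = (i, b)
        · rw [if_pos he] at hv
          obtain ⟨hi', hb'⟩ := Prod.mk.injEq .. ▸ he
          cases hv
          rw [hout]
          rw [hi', hb', ← hs]
        · rw [if_neg he] at hv
          exact h2 i' b' v hv

theorem alt_eq_gB (cq : List (Int × Int)) (m : Int) : get_patterns_alt cq m = gB cq m := by
  have hinv : MemoInv cq PySem.Dict.empty := by
    intro i b v hv
    simp [PySem.Dict.empty, PySem.Dict.get?] at hv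
  exact (goB_eq cq cq 0 m PySem.Dict.empty le_rfl (by simp) hinv).1

-- ===== VERDICT (by name: the statement is the Claim_ definition above) =====
theorem get_patterns_spec : Claim_equal_get_patterns := by
  intro cq maxl _ hpre
  unfold Spec_get_patterns
  rw [a_eq_gB cq maxl hpre, alt_eq_gB]
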